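-- pv_equiv track=rewrite | github.com/darrelhong/problems | dp/max_symmetric_substring_length.py | max_symmetric_substring_length
-- ===== SOURCE A (Python) =====
-- def max_symmetric_substring_length(s):
--     n = len(s)
--     dp = [[0] * n for _ in range(n)]
--
--     max_length = 0
--
--     for length in range(2, n + 1, 2):
--         for left in range(0, n - length + 1):
--             right = left + length - 1
--             if (
--                 s[left] == "<"
--                 and s[right] == ">"
--                 or s[left] == "<"
--                 and s[right] == "?"
--                 or s[left] == "?"
--                 and s[right] == ">"
--                 or s[left] == "?"
--                 and s[right] == "?"
--             ):
--                 dp[left][right] = dp[left + 1][right - 1] + 2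
--                 if dp[left][right] == right - left + 1:
--                     max_length = max(max_length, dp[left][right])
--
--     return max_length
-- ===== SOURCE B (Python) =====
-- def max_symmetric_substring_length(s):
--     # O(n): a fully symmetric substring is an openish run ('<'/'?') followed by an
--     # equally long closish run ('>'/'?'); take 2*min of the runs at each boundary.
--     run = 0
--     close_runs = []
--     for c in reversed(s):
--         run = run + 1 if c in ">?" else 0
--         close_runs.append(run)
--     close_runs.reverse()
--     close_runs.append(0)
--     best = 0
--     open_run = 0
--     for c, close_next in zip(s, close_runs[1:]):
--         open_run = open_run + 1 if c in "<?" else 0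
--         best = max(best, 2 * min(open_run, close_next))
--     return best
-- ===== Notes on version B (the rewrite author's own statement) =====
-- stated objective: faster
-- what changed: Replaced the O(n^2) interval dp table (a fully symmetric window must be an opening run followed by an equally long closing run) with a two-pass O(n) scan that precomputes closing-run lengths and takes 2*min(open run, close run) at each boundary.
import Mathlib
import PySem

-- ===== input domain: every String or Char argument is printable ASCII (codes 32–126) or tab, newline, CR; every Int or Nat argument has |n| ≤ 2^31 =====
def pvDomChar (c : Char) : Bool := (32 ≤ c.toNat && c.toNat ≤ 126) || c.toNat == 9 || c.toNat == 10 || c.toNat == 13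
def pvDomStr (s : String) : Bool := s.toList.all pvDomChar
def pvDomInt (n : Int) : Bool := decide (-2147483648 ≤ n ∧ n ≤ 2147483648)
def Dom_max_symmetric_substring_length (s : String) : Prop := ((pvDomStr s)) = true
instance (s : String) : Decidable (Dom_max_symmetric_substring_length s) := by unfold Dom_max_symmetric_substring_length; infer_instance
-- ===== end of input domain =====

-- B replaces A's O(n²) interval dp by one O(n) pass over run lengths of opening ('<','?')
-- and closing ('>','?') characters: at each boundary the answer candidate is 2·min of the runs.

-- ===== PORT A =====
def pvIsOpen (c : Char) : Bool := c == '<' || c == '?'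
def pvIsClose (c : Char) : Bool := c == '>' || c == '?'

def pvMatch (cl cr : Char) : Bool :=
  (cl == '<' && cr == '>') || (cl == '<' && cr == '?') ||
  (cl == '?' && cr == '>') || (cl == '?' && cr == '?')

-- dp[i][j] read / write; every access A performs is in range, so the defaults are never used
def pvDpGet (dp : List (List Int)) (i j : Int) : Int :=
  PySem.List.pyGetD (PySem.List.pyGetD dp i []) j 0

def pvDpSet (dp : List (List Int)) (i j : Int) (v : Int) : List (List Int) :=
  PySem.List.pySetD dp i (PySem.List.pySetD (PySem.List.pyGetD dp i []) j v)

-- the body of A's inner loop (one value of `left` for the current `length`)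
def pvInner (cs : List Char) (length : Int) (st : List (List Int) × Int) (left : Int) :
    List (List Int) × Int :=
  let dp := st.1
  let maxl := st.2
  let right := left + length - 1
  let sl := PySem.List.pyGetD cs left ' '
  let sr := PySem.List.pyGetD cs right ' '
  if pvMatch sl sr then
    let v := pvDpGet dp (left + 1) (right - 1) + 2
    let dp' := pvDpSet dp left right v
    if v == right - left + 1 then (dp', max maxl v) else (dp', maxl)
  else st

def max_symmetric_substring_length (s : String) : Int :=
  let cs := s.toList
  let n : Int := PySem.List.len cs
  let dp0 : List (List Int) := List.replicate cs.length (List.replicate cs.length 0)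
  let res := (PySem.List.pyRange 2 (n + 1) 2).foldl (fun st length =>
    (PySem.List.pyRange 0 (n - length + 1) 1).foldl (pvInner cs length) st) (dp0, 0)
  res.2

-- ===== PORT B =====
def max_symmetric_substring_length_alt (s : String) : Int :=
  let cs := s.toList
  let p := cs.reverse.foldl (fun (st : Int × List Int) c =>
      let run := if pvIsClose c then st.1 + 1 else 0
      (run, st.2 ++ [run])) (0, [])
  let close_runs := p.2.reverse ++ [0]
  let q := (cs.zip (PySem.List.slice close_runs (some 1) none)).foldl
      (fun (st : Int × Int) pr =>
        let open_run := if pvIsOpen pr.1 then st.2 + 1 else 0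
        (max st.1 (2 * min open_run pr.2), open_run)) (0, 0)
  q.1

-- ===== PRECONDITION & SPEC =====
def Spec_max_symmetric_substring_length (s : String) (out : Int) : Prop := out = max_symmetric_substring_length_alt s
instance (s : String) (out : Int) : Decidable (Spec_max_symmetric_substring_length s out) := by unfold Spec_max_symmetric_substring_length; infer_instance

-- ===== CLAIM (what is proved, stated in full; the proofs are below) =====
def Claim_equal_max_symmetric_substring_length : Prop := ∀ (s : String), Dom_max_symmetric_substring_length s → Spec_max_symmetric_substring_length s (max_symmetric_substring_length s)

-- ===== LEMMAS AND PROOFS =====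

-- Spec layer: index predicates, the nested-chain value of A's dp, run lengths, and the
-- running maxima both loops compute.
def pvOp (cs : List Char) (j : Nat) : Bool := pvIsOpen (cs.getD j ' ')
def pvCl (cs : List Char) (j : Nat) : Bool := pvIsClose (cs.getD j ' ')

def pvChain (cs : List Char) : Nat → Nat → Nat
  | _, 0 => 0
  | l, m + 1 => if pvOp cs l && pvCl cs (l + 2 * m + 1) then pvChain cs (l + 1) m + 2 else 0

def pvO (cs : List Char) : Nat → Nat
  | 0 => 0
  | j + 1 => if pvOp cs j then pvO cs j + 1 else 0

def pvCsuf : List Char → Nat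
  | [] => 0
  | c :: t => if pvIsClose c then pvCsuf t + 1 else 0

def pvC (cs : List Char) (j : Nat) : Nat := pvCsuf (cs.drop j)

def pvEup (cs : List Char) (m t : Nat) : Bool :=
  (List.range t).any (fun l => pvChain cs l m == 2 * m)

def pvE (cs : List Char) (m : Nat) : Bool := pvEup cs m cs.length

def pvAS (cs : List Char) : Nat → Nat
  | 0 => 0
  | m + 1 => max (pvAS cs m) (if pvE cs (m + 1) then 2 * (m + 1) else 0)

def pvBS (cs : List Char) : Nat → Nat
  | 0 => 0
  | i + 1 => max (pvBS cs i) (2 * min (pvO cs (i + 1)) (pvC cs (i + 1)))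

-- basic facts ---------------------------------------------------------------

theorem pvCl_lt {cs : List Char} {j : Nat} (h : pvCl cs j = true) : j < cs.length := by
  by_contra hn
  simp [pvCl, List.getD_eq_getElem?_getD, List.getElem?_eq_none (by omega : cs.length ≤ j), pvIsClose] at h


theorem pvChain_eq_iff (cs : List Char) (l m : Nat) :
    pvChain cs l m = 2 * m ↔ ∀ k < m, pvOp cs (l + k) = true ∧ pvCl cs (l + 2 * m - 1 - k) = true := by
  induction m generalizing l with
  | zero => simp [pvChain]
  | succ m ih =>
    constructor
    · intro h k hk
      simp only [pvChain] at h
      by_cases hc : (pvOp cs l && pvCl cs (l + 2 * m + 1)) = true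
      · rw [if_pos hc] at h
        have hrest : pvChain cs (l + 1) m = 2 * m := by omega
        simp only [Bool.and_eq_true] at hc
        rcases Nat.eq_zero_or_pos k with hk0 | hk1
        · subst hk0
          refine ⟨by simpa using hc.1, ?_⟩
          have he : l + 2 * (m + 1) - 1 - 0 = l + 2 * m + 1 := by omega
          rw [he]; exact hc.2
        · have := (ih (l + 1)).1 hrest (k - 1) (by omega)
          have he1 : l + 1 + (k - 1) = l + k := by omega
          have he2 : l + 1 + 2 * m - 1 - (k - 1) = l + 2 * (m + 1) - 1 - k := by omega
          rw [he1, he2] at this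
          exact this
      · rw [if_neg hc] at h; omega
    · intro h
      have h0 := h 0 (by omega)
      have hcond : (pvOp cs l && pvCl cs (l + 2 * m + 1)) = true := by
        have he : l + 2 * (m + 1) - 1 - 0 = l + 2 * m + 1 := by omega
        simp only [Bool.and_eq_true]
        exact ⟨by simpa using h0.1, by rw [he] at h0; exact h0.2⟩
      have hrest : pvChain cs (l + 1) m = 2 * m := by
        apply (ih (l + 1)).2
        intro k hk
        have := h (k + 1) (by omega)
        have he1 : l + (k + 1) = l + 1 + k := by omega
        have he2 : l + 2 * (m + 1) - 1 - (k + 1) = l + 1 + 2 * m - 1 - k := by omega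
        rw [he1, he2] at this
        exact this
      simp only [pvChain, hcond, if_pos]
      omega

theorem pvChain_full_bound {cs : List Char} {l m : Nat} (hm : 1 ≤ m)
    (h : pvChain cs l m = 2 * m) : l + 2 * m ≤ cs.length := by
  have h0 := (pvChain_eq_iff cs l m).1 h 0 (by omega)
  have := pvCl_lt h0.2
  omega

-- open-run lemmas -----------------------------------------------------------
theorem pvO_le (cs : List Char) (j : Nat) : pvO cs j ≤ j := by
  induction j with
  | zero => simp [pvO]
  | succ j ih => simp only [pvO]; split <;> omega

theorem pvO_spec (cs : List Char) (j : Nat) : ∀ k < pvO cs j, pvOp cs (j - 1 - k) = true := by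
  induction j with
  | zero => simp [pvO]
  | succ j ih =>
    intro k hk
    simp only [pvO] at hk
    split at hk
    · rename_i hop
      rcases Nat.eq_zero_or_pos k with hk0 | hk1
      · subst hk0; simpa using hop
      · have := ih (k - 1) (by omega)
        have he : j + 1 - 1 - k = j - 1 - (k - 1) := by omega
        rw [he]; exact this
    · omega

theorem pvO_ge (cs : List Char) : ∀ t j, t ≤ j → (∀ k < t, pvOp cs (j - 1 - k) = true) → t ≤ pvO cs j := by
  intro t
  induction t with
  | zero => intro j _ _; omega
  | succ t ih =>
    intro j hj h
    obtain ⟨j', rfl⟩ : ∃ j', j = j' + 1 := ⟨j - 1, by omega⟩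
    have hop : pvOp cs j' = true := by simpa using h 0 (by omega)
    have ht : t ≤ pvO cs j' := by
      apply ih j' (by omega)
      intro k hk
      have := h (k + 1) (by omega)
      have he : j' + 1 - 1 - (k + 1) = j' - 1 - k := by omega
      rwa [he] at this
    simp only [pvO, hop, if_pos]
    omega

-- close-run lemmas ----------------------------------------------------------
theorem pvC_succ (cs : List Char) (j : Nat) :
    pvC cs j = if pvCl cs j then pvC cs (j + 1) + 1 else 0 := by
  by_cases hj : j < cs.length
  · have hd : cs.drop j = cs[j] :: cs.drop (j + 1) := List.drop_eq_getElem_cons hj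
    rw [pvC, hd]
    simp only [pvCsuf, pvCl, List.getD_eq_getElem?_getD, List.getElem?_eq_getElem hj,
      Option.getD_some, pvC]
  · have : cs.length ≤ j := by omega
    simp [pvC, List.drop_eq_nil_of_le this, List.drop_eq_nil_of_le (by omega : cs.length ≤ j + 1),
      pvCsuf, pvCl, List.getD_eq_getElem?_getD, List.getElem?_eq_none this, pvIsClose]

theorem pvCsuf_le (t : List Char) : pvCsuf t ≤ t.length := by
  induction t with
  | nil => simp [pvCsuf]
  | cons c t ih => simp only [pvCsuf]; split <;> simp <;> omega

theorem pvC_le (cs : List Char) (j : Nat) : pvC cs j ≤ cs.length - j := by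
  have := pvCsuf_le (cs.drop j)
  simpa [pvC] using this

theorem pvC_spec (cs : List Char) : ∀ k j, k < pvC cs j → pvCl cs (j + k) = true := by
  intro k
  induction k with
  | zero =>
    intro j h
    rw [pvC_succ] at h
    by_contra hn
    rw [if_neg (by simpa using hn)] at h
    omega
  | succ k ih =>
    intro j h
    rw [pvC_succ] at h
    split at h
    · have := ih (j + 1) (by omega)
      have he : j + (k + 1) = j + 1 + k := by omega
      rwa [he]
    · omega

theorem pvC_ge (cs : List Char) : ∀ t j, (∀ k < t, pvCl cs (j + k) = true) → t ≤ pvC cs j := by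
  intro t
  induction t with
  | zero => intro j _; omega
  | succ t ih =>
    intro j h
    have hcl : pvCl cs j = true := by simpa using h 0 (by omega)
    have ht : t ≤ pvC cs (j + 1) := by
      apply ih
      intro k hk
      have := h (k + 1) (by omega)
      have he : j + (k + 1) = j + 1 + k := by omega
      rwa [he] at this
    rw [pvC_succ, if_pos hcl]
    omega

-- running maxima ------------------------------------------------------------
theorem pvBS_mono (cs : List Char) {i i' : Nat} (h : i ≤ i') : pvBS cs i ≤ pvBS cs i' := by
  induction i' with
  | zero => have : i = 0 := by omega
            subst this; exact le_rfl
  | succ i' ih =>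
    rcases Nat.lt_or_ge i (i' + 1) with hlt | hge
    · have := ih (by omega)
      simp only [pvBS]; omega
    · have : i = i' + 1 := by omega
      subst this; exact le_rfl

theorem pvBS_ge (cs : List Char) {i : Nat} (h : i + 1 ≤ i') :
    2 * min (pvO cs (i + 1)) (pvC cs (i + 1)) ≤ pvBS cs i' := by
  have h1 : 2 * min (pvO cs (i + 1)) (pvC cs (i + 1)) ≤ pvBS cs (i + 1) := by
    simp only [pvBS]; omega
  exact le_trans h1 (pvBS_mono cs h)

theorem pvAS_mono (cs : List Char) {m m' : Nat} (h : m ≤ m') : pvAS cs m ≤ pvAS cs m' := by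
  induction m' with
  | zero => have : m = 0 := by omega
            subst this; exact le_rfl
  | succ m' ih =>
    rcases Nat.lt_or_ge m (m' + 1) with hlt | hge
    · have := ih (by omega)
      simp only [pvAS]; omega
    · have : m = m' + 1 := by omega
      subst this; exact le_rfl

theorem pvAS_ge (cs : List Char) {m m0 : Nat} (h1 : 1 ≤ m) (h2 : m ≤ m0) (hE : pvE cs m = true) :
    2 * m ≤ pvAS cs m0 := by
  obtain ⟨m', rfl⟩ : ∃ m', m = m' + 1 := ⟨m - 1, by omega⟩
  have : 2 * (m' + 1) ≤ pvAS cs (m' + 1) := by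
    simp only [pvAS, hE, if_pos]; omega
  exact le_trans this (pvAS_mono cs h2)

theorem pvE_iff (cs : List Char) (m t : Nat) :
    pvEup cs m t = true ↔ ∃ l < t, pvChain cs l m = 2 * m := by
  simp [pvEup, List.any_eq_true]

-- the core combinatorial identity: A's maximum equals B's maximum ------------
theorem pvAS_le_pvBS (cs : List Char) : ∀ m0, pvAS cs m0 ≤ pvBS cs cs.length := by
  intro m0
  induction m0 with
  | zero => simp [pvAS]
  | succ m ih =>
    simp only [pvAS]
    rcases hE : pvE cs (m + 1) with _ | _
    · simpa [hE] using ih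
    · rw [if_pos rfl]
      refine max_le ih ?_
      obtain ⟨l, _, hch⟩ := (pvE_iff cs (m + 1) cs.length).1 hE
      have hb : l + 2 * (m + 1) ≤ cs.length := pvChain_full_bound (by omega) hch
      have hall := (pvChain_eq_iff cs l (m + 1)).1 hch
      set m1 := m + 1 with hm1
      have hO : m1 ≤ pvO cs (l + m1) := by
        apply pvO_ge cs m1 (l + m1) (by omega)
        intro k hk
        have := (hall (m1 - 1 - k) (by omega)).1
        have he : l + (m1 - 1 - k) = l + m1 - 1 - k := by omega
        rwa [he] at this
      have hC : m1 ≤ pvC cs (l + m1) := by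
        apply pvC_ge cs m1 (l + m1)
        intro k hk
        have := (hall (m1 - 1 - k) (by omega)).2
        have he : l + 2 * m1 - 1 - (m1 - 1 - k) = l + m1 + k := by omega
        rwa [he] at this
      have := pvBS_ge cs (i := l + m1 - 1) (i' := cs.length) (by omega)
      have he : l + m1 - 1 + 1 = l + m1 := by omega
      rw [he] at this
      omega

theorem pvBS_le_pvAS (cs : List Char) : ∀ i, i ≤ cs.length → pvBS cs i ≤ pvAS cs (cs.length / 2) := by
  intro i
  induction i with
  | zero => simp [pvBS]
  | succ i ih =>
    intro hi
    simp only [pvBS]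
    refine max_le (ih (by omega)) ?_
    set m := min (pvO cs (i + 1)) (pvC cs (i + 1)) with hm
    rcases Nat.eq_zero_or_pos m with hm0 | hm1
    · omega
    · have hOle : pvO cs (i + 1) ≤ i + 1 := pvO_le cs (i + 1)
      have hmle : m ≤ i + 1 := by omega
      set l := i + 1 - m with hl
      have hch : pvChain cs l m = 2 * m := by
        apply (pvChain_eq_iff cs l m).2
        intro k hk
        constructor
        · have := pvO_spec cs (i + 1) (m - 1 - k) (by omega)
          have he : i + 1 - 1 - (m - 1 - k) = l + k := by omega
          rwa [he] at this
        · have := pvC_spec cs (m - 1 - k) (i + 1) (by omega)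
          have he : i + 1 + (m - 1 - k) = l + 2 * m - 1 - k := by omega
          rwa [he] at this
      have hCle : pvC cs (i + 1) ≤ cs.length - (i + 1) := pvC_le cs (i + 1)
      have hb : l + 2 * m ≤ cs.length := by omega
      have hE : pvE cs m = true := by
        apply (pvE_iff cs m cs.length).2
        exact ⟨l, by omega, hch⟩
      have := pvAS_ge cs (m := m) (m0 := cs.length / 2) hm1 (by omega) hE
      omega

theorem pvAS_eq_pvBS (cs : List Char) : pvAS cs (cs.length / 2) = pvBS cs cs.length :=
  Nat.le_antisymm (pvAS_le_pvBS cs _) (pvBS_le_pvAS cs _ le_rfl)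

-- port A = pvAS -------------------------------------------------------------
theorem pvMatch_eq (a b : Char) : pvMatch a b = (pvIsOpen a && pvIsClose b) := by
  cases h1 : a == '<' <;> cases h2 : a == '?' <;> cases h3 : b == '>' <;> cases h4 : b == '?' <;>
    simp [pvMatch, pvIsOpen, pvIsClose, h1, h2, h3, h4]

theorem pvGetD_set {α : Type} (dp : List α) (i j : Nat) (x : α) (d : α) :
    (dp.set i x).getD j d = if j = i ∧ i < dp.length then x else dp.getD j d := by
  simp only [List.getD_eq_getElem?_getD, List.getElem?_set]
  split_ifs with h1 <;> rename_i h <;> simp_all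

theorem pvEup_succ (cs : List Char) (m t : Nat) :
    pvEup cs m (t + 1) = (pvEup cs m t || (pvChain cs t m == 2 * m)) := by
  simp [pvEup, List.range_succ]

theorem pvChain_succ (cs : List Char) (l m : Nat) :
    pvChain cs l (m + 1) = if pvOp cs l && pvCl cs (l + 2 * m + 1) then pvChain cs (l + 1) m + 2 else 0 := rfl

-- invariant on the dp table after all lengths ≤ 2m were processed
def pvDpInv (cs : List Char) (m : Nat) (dp : List (List Int)) : Prop :=
  dp.length = cs.length ∧
  (∀ i : Nat, (dp.getD i []).length = if i < cs.length then cs.length else 0) ∧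
  (∀ l r : Nat, l < cs.length → r < cs.length →
    (dp.getD l []).getD r 0 =
      if l + 2 ≤ r + 1 ∧ (r + 1 - l) % 2 = 0 ∧ r + 1 - l ≤ 2 * m
      then ((pvChain cs l ((r + 1 - l) / 2) : Nat) : Int) else 0)

-- invariant in the middle of the pass for length 2(m+1), with lefts 0..t-1 done
def pvDpInvP (cs : List Char) (m t : Nat) (dp : List (List Int)) : Prop :=
  dp.length = cs.length ∧
  (∀ i : Nat, (dp.getD i []).length = if i < cs.length then cs.length else 0) ∧
  (∀ l r : Nat, l < cs.length → r < cs.length →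
    (dp.getD l []).getD r 0 =
      if r + 1 = l + 2 * (m + 1) ∧ l < t then ((pvChain cs l (m + 1) : Nat) : Int)
      else if l + 2 ≤ r + 1 ∧ (r + 1 - l) % 2 = 0 ∧ r + 1 - l ≤ 2 * m
      then ((pvChain cs l ((r + 1 - l) / 2) : Nat) : Int) else 0)

theorem pvDpInvP_zero {cs : List Char} {m : Nat} {dp : List (List Int)}
    (h : pvDpInv cs m dp) : pvDpInvP cs m 0 dp := by
  obtain ⟨h1, h2, h3⟩ := h
  refine ⟨h1, h2, ?_⟩
  intro l r hl hr
  rw [h3 l r hl hr, if_neg (show ¬(r + 1 = l + 2 * (m + 1) ∧ l < 0) by omega)]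

theorem pvDpInv_of_P {cs : List Char} {m : Nat} {dp : List (List Int)}
    (h : pvDpInvP cs m (cs.length - (2 * m + 1)) dp) : pvDpInv cs (m + 1) dp := by
  obtain ⟨h1, h2, h3⟩ := h
  refine ⟨h1, h2, ?_⟩
  intro l r hl hr
  rw [h3 l r hl hr]
  by_cases hc : r + 1 = l + 2 * (m + 1)
  · rw [if_pos (show r + 1 = l + 2 * (m + 1) ∧ l < cs.length - (2 * m + 1) from ⟨hc, by omega⟩),
      if_pos (show l + 2 ≤ r + 1 ∧ (r + 1 - l) % 2 = 0 ∧ r + 1 - l ≤ 2 * (m + 1) by omega)]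
    have hdiv : (r + 1 - l) / 2 = m + 1 := by omega
    rw [hdiv]
  · rw [if_neg (show ¬(r + 1 = l + 2 * (m + 1) ∧ l < cs.length - (2 * m + 1)) from fun h => hc h.1)]
    split_ifs with h4 h5 <;> first | rfl | omega

theorem pvInner_eval (cs : List Char) (m t : Nat) (dp : List (List Int)) (maxl : Int) :
    pvInner cs (2 + 2 * (m : Int)) (dp, maxl) ((t : Nat) : Int) =
      if pvOp cs t && pvCl cs (t + 2 * m + 1) then
        (if (dp.getD (t + 1) []).getD (t + 2 * m) 0 + 2 = ((2 * (m + 1) : Nat) : Int)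
         then (dp.set t ((dp.getD t []).set (t + 2 * m + 1) ((dp.getD (t + 1) []).getD (t + 2 * m) 0 + 2)),
               max maxl ((dp.getD (t + 1) []).getD (t + 2 * m) 0 + 2))
         else (dp.set t ((dp.getD t []).set (t + 2 * m + 1) ((dp.getD (t + 1) []).getD (t + 2 * m) 0 + 2)), maxl))
      else (dp, maxl) := by
  have h1 : (t : Int) + (2 + 2 * (m : Int)) - 1 = ((t + 2 * m + 1 : Nat) : Int) := by push_cast; ring
  have h2 : ((t + 2 * m + 1 : Nat) : Int) - 1 = ((t + 2 * m : Nat) : Int) := by push_cast; ring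
  have h3 : (t : Int) + 1 = ((t + 1 : Nat) : Int) := by push_cast; ring
  have h4 : ((t + 2 * m + 1 : Nat) : Int) - (t : Int) + 1 = ((2 * (m + 1) : Nat) : Int) := by push_cast; ring
  simp only [pvInner, pvDpGet, pvDpSet, h1, h2, h3, h4, PySem.List.pyGetD_natCast,
    PySem.List.pySetD_natCast, pvMatch_eq, pvOp, pvCl, beq_iff_eq]
  rfl

theorem pvInnerStep (cs : List Char) (m t : Nat) (dp : List (List Int))
    (ht : t + 2 * m + 2 ≤ cs.length) (hinv : pvDpInvP cs m t dp) :
    ∃ dp', pvInner cs (2 + 2 * (m : Int))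
        (dp, ((max (pvAS cs m) (if pvEup cs (m + 1) t then 2 * (m + 1) else 0) : Nat) : Int)) ((t : Nat) : Int)
      = (dp', ((max (pvAS cs m) (if pvEup cs (m + 1) (t + 1) then 2 * (m + 1) else 0) : Nat) : Int))
      ∧ pvDpInvP cs m (t + 1) dp' := by
  obtain ⟨hlen, hrow, hval⟩ := hinv
  rw [pvInner_eval]
  by_cases hcond : (pvOp cs t && pvCl cs (t + 2 * m + 1)) = true
  · -- the endpoints match: A writes dp[t][t+2m+1]
    rw [if_pos hcond]
    have hchain : pvChain cs t (m + 1) = pvChain cs (t + 1) m + 2 := by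
      rw [pvChain_succ, if_pos hcond]
    have hvread : (dp.getD (t + 1) []).getD (t + 2 * m) 0 = ((pvChain cs (t + 1) m : Nat) : Int) := by
      rw [hval (t + 1) (t + 2 * m) (by omega) (by omega)]
      rw [if_neg (show ¬(t + 2 * m + 1 = t + 1 + 2 * (m + 1) ∧ t + 1 < t) by omega)]
      rcases Nat.eq_zero_or_pos m with hm0 | hm1
      · subst hm0
        rw [if_neg (by omega)]
        simp [pvChain]
      · rw [if_pos (by omega)]
        have hd : (t + 2 * m + 1 - (t + 1)) / 2 = m := by omega
        rw [hd]
    have hv : (dp.getD (t + 1) []).getD (t + 2 * m) 0 + 2 = ((pvChain cs t (m + 1) : Nat) : Int) := by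
      rw [hvread, hchain]; push_cast; ring
    rw [hv]
    have htlt : t < dp.length := by omega
    have hrl : t + 2 * m + 1 < (dp.getD t []).length := by
      rw [hrow t, if_pos (by omega)]; omega
    -- the updated table satisfies the invariant for t+1, whether or not the window was full
    have hinv' : pvDpInvP cs m (t + 1)
        (dp.set t ((dp.getD t []).set (t + 2 * m + 1) ((pvChain cs t (m + 1) : Nat) : Int))) := by
      refine ⟨by rw [List.length_set]; exact hlen, ?_, ?_⟩
      · intro i
        rw [pvGetD_set]
        by_cases hi : i = t ∧ t < dp.length
        · rw [if_pos hi, List.length_set, hrow t]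
          obtain ⟨rfl, -⟩ := hi
          rfl
        · rw [if_neg hi]; exact hrow i
      · intro l r hl hr
        rw [pvGetD_set]
        by_cases hlt : l = t ∧ t < dp.length
        · obtain ⟨rfl, -⟩ := hlt
          rw [if_pos ⟨rfl, htlt⟩, pvGetD_set]
          by_cases hreq : r = l + 2 * m + 1 ∧ l + 2 * m + 1 < (dp.getD l []).length
          · obtain ⟨rfl, -⟩ := hreq
            rw [if_pos ⟨rfl, hrl⟩, if_pos (show l + 2 * m + 1 + 1 = l + 2 * (m + 1) ∧ l < l + 1 by omega)]
          · rw [if_neg hreq, hval l r hl hr]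
            have hrne : r ≠ l + 2 * m + 1 := fun h => hreq ⟨h, hrl⟩
            rw [if_neg (show ¬(r + 1 = l + 2 * (m + 1) ∧ l < l) by omega),
              if_neg (show ¬(r + 1 = l + 2 * (m + 1) ∧ l < l + 1) by omega)]
        · have hlne : l ≠ t := fun h => hlt ⟨h, htlt⟩
          rw [if_neg hlt, hval l r hl hr]
          by_cases hB : r + 1 = l + 2 * (m + 1) ∧ l < t
          · rw [if_pos hB, if_pos ⟨hB.1, by omega⟩]
          · rw [if_neg hB, if_neg (show ¬(r + 1 = l + 2 * (m + 1) ∧ l < t + 1) by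
              intro h; exact hB ⟨h.1, by omega⟩)]
    by_cases hfull : pvChain cs t (m + 1) = 2 * (m + 1)
    · rw [if_pos (show ((pvChain cs t (m + 1) : Nat) : Int) = ((2 * (m + 1) : Nat) : Int) from by
        exact_mod_cast hfull)]
      refine ⟨_, ?_, hinv'⟩
      have hE1 : pvEup cs (m + 1) (t + 1) = true := by
        rw [pvEup_succ]
        have : (pvChain cs t (m + 1) == 2 * (m + 1)) = true := by simp [hfull]
        rw [this, Bool.or_true]
      rw [hE1, if_pos rfl]
      have hnat : max (max (pvAS cs m) (if pvEup cs (m + 1) t then 2 * (m + 1) else 0)) (2 * (m + 1))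
          = max (pvAS cs m) (2 * (m + 1)) := by
        split_ifs <;> omega
      rw [hfull, ← Nat.cast_max, hnat]
    · rw [if_neg (show ¬((pvChain cs t (m + 1) : Nat) : Int) = ((2 * (m + 1) : Nat) : Int) from by
        intro h; exact hfull (by exact_mod_cast h))]
      refine ⟨_, ?_, hinv'⟩
      have hE1 : pvEup cs (m + 1) (t + 1) = pvEup cs (m + 1) t := by
        rw [pvEup_succ]
        have : (pvChain cs t (m + 1) == 2 * (m + 1)) = false := by simp [hfull]
        rw [this, Bool.or_false]
      rw [hE1]
  · -- no match: nothing is written and pvChain cs t (m+1) = 0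
    rw [if_neg hcond]
    have hch0 : pvChain cs t (m + 1) = 0 := by
      rw [pvChain_succ, if_neg hcond]
    refine ⟨dp, ?_, ?_⟩
    · have hE1 : pvEup cs (m + 1) (t + 1) = pvEup cs (m + 1) t := by
        rw [pvEup_succ, hch0]
        have : ((0 : Nat) == 2 * (m + 1)) = false := by simp
        rw [this, Bool.or_false]
      rw [hE1]
    · refine ⟨hlen, hrow, ?_⟩
      intro l r hl hr
      rw [hval l r hl hr]
      by_cases hB : r + 1 = l + 2 * (m + 1)
      · by_cases hlt : l < t
        · rw [if_pos ⟨hB, hlt⟩, if_pos ⟨hB, by omega⟩]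
        · rw [if_neg (fun h => hlt h.2)]
          by_cases hlt1 : l < t + 1
          · have hlteq : l = t := by omega
            subst hlteq
            rw [if_neg (show ¬(l + 2 ≤ r + 1 ∧ (r + 1 - l) % 2 = 0 ∧ r + 1 - l ≤ 2 * m) by omega),
              if_pos (show r + 1 = l + 2 * (m + 1) ∧ l < l + 1 from ⟨hB, by omega⟩), hch0]
            simp
          · rw [if_neg (show ¬(r + 1 = l + 2 * (m + 1) ∧ l < t + 1) from fun h => hlt1 h.2)]
      · rw [if_neg (show ¬(r + 1 = l + 2 * (m + 1) ∧ l < t) from fun h => hB h.1),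
          if_neg (show ¬(r + 1 = l + 2 * (m + 1) ∧ l < t + 1) from fun h => hB h.1)]

theorem pvInnerFold (cs : List Char) (m : Nat) (dp0 : List (List Int)) (h0 : pvDpInv cs m dp0) :
    ∀ t, t ≤ cs.length - (2 * m + 1) →
    ∃ dp, ((List.range t).map (fun (k : Nat) => (0 : Int) + (k : Int))).foldl
        (pvInner cs (2 + 2 * (m : Int))) (dp0, ((pvAS cs m : Nat) : Int))
      = (dp, ((max (pvAS cs m) (if pvEup cs (m + 1) t then 2 * (m + 1) else 0) : Nat) : Int))
      ∧ pvDpInvP cs m t dp := by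
  intro t
  induction t with
  | zero =>
    intro _
    refine ⟨dp0, ?_, pvDpInvP_zero h0⟩
    have : pvEup cs (m + 1) 0 = false := by simp [pvEup]
    rw [this]
    simp
  | succ t ih =>
    intro hbound
    obtain ⟨dp, heq, hinv⟩ := ih (by omega)
    rw [List.range_succ, List.map_append, List.foldl_append, heq]
    simp only [List.map_cons, List.map_nil, List.foldl_cons, List.foldl_nil, zero_add]
    exact pvInnerStep cs m t dp (by omega) hinv

theorem pvEup_K (cs : List Char) (m : Nat) :
    pvEup cs (m + 1) (cs.length - (2 * m + 1)) = pvE cs (m + 1) := by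
  rw [Bool.eq_iff_iff, pvE, pvE_iff, pvE_iff]
  constructor
  · rintro ⟨l, hl, hch⟩
    exact ⟨l, by omega, hch⟩
  · rintro ⟨l, hl, hch⟩
    have := pvChain_full_bound (by omega) hch
    exact ⟨l, by omega, hch⟩

theorem pvPass (cs : List Char) (m : Nat) (dp0 : List (List Int)) (h0 : pvDpInv cs m dp0) :
    ∃ dp, (PySem.List.pyRange 0 ((cs.length : Int) - (2 + 2 * (m : Int)) + 1) 1).foldl
        (pvInner cs (2 + 2 * (m : Int))) (dp0, ((pvAS cs m : Nat) : Int))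
      = (dp, ((pvAS cs (m + 1) : Nat) : Int)) ∧ pvDpInv cs (m + 1) dp := by
  have hK : ((cs.length : Int) - (2 + 2 * (m : Int)) + 1 - 0).toNat = cs.length - (2 * m + 1) := by
    omega
  rw [PySem.List.pyRange_one, hK]
  obtain ⟨dp, heq, hinv⟩ := pvInnerFold cs m dp0 h0 (cs.length - (2 * m + 1)) le_rfl
  refine ⟨dp, ?_, pvDpInv_of_P hinv⟩
  rw [heq]
  have : pvAS cs (m + 1) = max (pvAS cs m) (if pvEup cs (m + 1) (cs.length - (2 * m + 1)) then 2 * (m + 1) else 0) := by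
    simp only [pvAS]
    rw [pvEup_K]
  rw [this]

theorem pvOuterFold (cs : List Char) (dp0 : List (List Int)) (h0 : pvDpInv cs 0 dp0) :
    ∀ M, ∃ dp, ((List.range M).map (fun (k : Nat) => (2 : Int) + 2 * (k : Int))).foldl
        (fun st length => (PySem.List.pyRange 0 ((cs.length : Int) - length + 1) 1).foldl (pvInner cs length) st)
        (dp0, 0)
      = (dp, ((pvAS cs M : Nat) : Int)) ∧ pvDpInv cs M dp := by
  intro M
  induction M with
  | zero =>
    refine ⟨dp0, ?_, h0⟩
    simp [pvAS]
  | succ M ih =>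
    obtain ⟨dp, heq, hinv⟩ := ih
    rw [List.range_succ, List.map_append, List.foldl_append, heq]
    simp only [List.map_cons, List.map_nil, List.foldl_cons, List.foldl_nil]
    exact pvPass cs M dp hinv

theorem pvDpInv_init (cs : List Char) :
    pvDpInv cs 0 (List.replicate cs.length (List.replicate cs.length 0)) := by
  refine ⟨by simp, ?_, ?_⟩
  · intro i
    by_cases hi : i < cs.length <;>
      simp [List.getD_eq_getElem?_getD, List.getElem?_replicate, hi]
  · intro l r hl hr
    rw [if_neg (by omega)]
    simp [List.getD_eq_getElem?_getD, List.getElem?_replicate, hl, hr]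

theorem portA_eq (s : String) :
    max_symmetric_substring_length s = ((pvAS s.toList (s.toList.length / 2) : Nat) : Int) := by
  unfold max_symmetric_substring_length
  simp only [PySem.List.len_eq]
  have hr2 : PySem.List.pyRange 2 ((s.toList.length : Int) + 1) 2
      = (List.range (s.toList.length / 2)).map (fun (k : Nat) => (2 : Int) + 2 * (k : Int)) := by
    rw [PySem.List.pyRange_of_pos _ _ (by norm_num)]
    congr 1
    split_ifs with h
    · have he : ((s.toList.length : Int) + 1 - 2 + 2 - 1) = (s.toList.length : Int) := by ring
      rw [he]
      have h2 : ((s.toList.length : Int)) / 2 = ((s.toList.length / 2 : Nat) : Int) := by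
        rw [Int.natCast_div]
        norm_num
      rw [h2, Int.toNat_natCast]
    · exact congrArg List.range (Nat.div_eq_of_lt (show s.toList.length < 2 by omega)).symm
  rw [hr2]
  obtain ⟨dp, heq, -⟩ := pvOuterFold s.toList
    (List.replicate s.toList.length (List.replicate s.toList.length 0)) (pvDpInv_init s.toList)
    (s.toList.length / 2)
  rw [heq]

-- port B = pvBS -------------------------------------------------------------
def pvRunAfter : List Char → Int → Int
  | [], r => r
  | c :: t, r => pvRunAfter t (if pvIsClose c then r + 1 else 0)

def pvProduced : List Char → Int → List Int
  | [], _ => []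
  | c :: t, r => (if pvIsClose c then r + 1 else 0) :: pvProduced t (if pvIsClose c then r + 1 else 0)

theorem pvCloseFold (ys : List Char) : ∀ (r : Int) (a : List Int),
    ys.foldl (fun (st : Int × List Int) c =>
      let run := if pvIsClose c then st.1 + 1 else 0
      (run, st.2 ++ [run])) (r, a) = (pvRunAfter ys r, a ++ pvProduced ys r) := by
  induction ys with
  | nil => intro r a; simp [pvRunAfter, pvProduced]
  | cons c t ih =>
    intro r a
    simp only [List.foldl_cons, pvRunAfter, pvProduced]
    rw [ih]
    simp

theorem pvRunAfter_append (u : List Char) (c : Char) : ∀ r,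
    pvRunAfter (u ++ [c]) r = if pvIsClose c then pvRunAfter u r + 1 else 0 := by
  induction u with
  | nil => intro r; simp [pvRunAfter]
  | cons d t ih => intro r; simp only [List.cons_append, pvRunAfter]; exact ih _

theorem pvRunAfter_reverse (cs : List Char) : pvRunAfter cs.reverse 0 = ((pvCsuf cs : Nat) : Int) := by
  induction cs with
  | nil => simp [pvRunAfter, pvCsuf]
  | cons c t ih =>
    rw [List.reverse_cons, pvRunAfter_append, ih]
    simp only [pvCsuf]
    split <;> push_cast <;> ring

theorem pvProduced_append (u v : List Char) : ∀ r,
    pvProduced (u ++ v) r = pvProduced u r ++ pvProduced v (pvRunAfter u r) := by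
  induction u with
  | nil => intro r; simp [pvProduced, pvRunAfter]
  | cons c t ih =>
    intro r
    simp only [List.cons_append, pvProduced, pvRunAfter]
    rw [ih]


theorem pvProduced_reverse (cs : List Char) :
    pvProduced cs.reverse 0 = ((List.range cs.length).map (fun j => ((pvC cs j : Nat) : Int))).reverse := by
  induction cs with
  | nil => simp [pvProduced]
  | cons c t ih =>
    rw [List.reverse_cons, pvProduced_append, ih, pvRunAfter_reverse]
    have h1 : pvProduced [c] ((pvCsuf t : Nat) : Int) = [((pvCsuf (c :: t) : Nat) : Int)] := by
      simp only [pvProduced, pvCsuf]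
      split <;> push_cast <;> simp
    rw [h1]
    have h2 : (List.range (c :: t).length).map (fun j => ((pvC (c :: t) j : Nat) : Int))
        = ((pvCsuf (c :: t) : Nat) : Int) :: (List.range t.length).map (fun j => ((pvC t j : Nat) : Int)) := by
      simp only [List.length_cons, List.range_succ_eq_map, List.map_cons, List.map_map]
      constructor
    rw [h2, List.reverse_cons]

theorem pvZipMapRange (cs : List Char) (g : Nat → Int) :
    cs.zip ((List.range cs.length).map g) = (List.range cs.length).map (fun j => (cs.getD j ' ', g j)) := by
  apply List.ext_getElem
  · simp
  · intro i h1 h2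
    simp only [List.getElem_zip, List.getElem_map, List.getElem_range]
    have hi : i < cs.length := by simpa using h2
    simp [List.getD_eq_getElem?_getD, List.getElem?_eq_getElem hi]

theorem pvBFold (cs : List Char) : ∀ n,
    ((List.range n).map (fun j => (cs.getD j ' ', ((pvC cs (j + 1) : Nat) : Int)))).foldl
      (fun (st : Int × Int) pr =>
        let open_run := if pvIsOpen pr.1 then st.2 + 1 else 0
        (max st.1 (2 * min open_run pr.2), open_run)) (0, 0)
    = (((pvBS cs n : Nat) : Int), ((pvO cs n : Nat) : Int)) := by
  intro n
  induction n with
  | zero => simp [pvBS, pvO]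
  | succ n ih =>
    rw [List.range_succ, List.map_append, List.foldl_append, ih]
    simp only [List.map_cons, List.map_nil, List.foldl_cons, List.foldl_nil]
    have hopen : (if pvIsOpen (cs.getD n ' ') then ((pvO cs n : Nat) : Int) + 1 else 0)
        = ((pvO cs (n + 1) : Nat) : Int) := by
      simp only [pvO, pvOp]
      split <;> push_cast <;> ring
    rw [hopen]
    have hbest : max ((pvBS cs n : Nat) : Int) (2 * min ((pvO cs (n + 1) : Nat) : Int) ((pvC cs (n + 1) : Nat) : Int))
        = ((pvBS cs (n + 1) : Nat) : Int) := by
      simp only [pvBS]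
      push_cast
      rfl
    rw [hbest]

theorem portB_eq (s : String) :
    max_symmetric_substring_length_alt s = ((pvBS s.toList s.toList.length : Nat) : Int) := by
  unfold max_symmetric_substring_length_alt
  set cs := s.toList with hcs
  simp only
  rw [pvCloseFold, pvProduced_reverse]
  simp only [List.nil_append, List.reverse_reverse]
  have hruns : (List.range cs.length).map (fun j => ((pvC cs j : Nat) : Int)) ++ [(0 : Int)]
      = (List.range (cs.length + 1)).map (fun j => ((pvC cs j : Nat) : Int)) := by
    rw [List.range_succ, List.map_append]
    simp [pvC, List.drop_length, pvCsuf]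
  rw [hruns, PySem.List.slice_from_one]
  have htail : ((List.range (cs.length + 1)).map (fun j => ((pvC cs j : Nat) : Int))).tail
      = (List.range cs.length).map (fun j => ((pvC cs (j + 1) : Nat) : Int)) := by
    rw [List.range_succ_eq_map]
    simp [List.map_map, Function.comp]
  rw [htail, pvZipMapRange, pvBFold]

-- ===== VERDICT (by name: the statement is the Claim_ definition above) =====
theorem max_symmetric_substring_length_spec : Claim_equal_max_symmetric_substring_length := by
  intro s _
  unfold Spec_max_symmetric_substring_length
  rw [portA_eq, portB_eq, pvAS_eq_pvBS]
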